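-- pv_equiv track=rewrite | github.com/dolgodolah/TIL | algorithm/Programmers/카카오 코딩테스트/2018 카카오 블라인드 채용_[3차] n진수 게임.py | solution
-- ===== SOURCE A (Python) =====
-- def solution(n, t, m, p):
--     answer = ''
--
--     def change_num(idx,n): #(n집번으로 바꾸려는 수, n진법)
--         result = ''
--         if idx==0:
--             return '0'
--         while idx>0:
--             if idx%n>=10: #10~15는 각각 대문자 A~F로 출력한다.
--                 result=hex(idx%n).upper()[2:]+result
--             else:
--                 result=str(idx%n)+result
--             idx=idx//n
--         return result
--
--     turn = 1
--     idx=0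
--     while True:
--         num = change_num(idx,n) #말하려고 하는 10진수를 n진수로 바꾼다.
--         for i in range(len(num)):
--             if turn==p: #해당 턴이 플레이어(튜브)의 순서라면
--                 answer+=num[i] #플레이어(튜브)가 말해야하는 숫자를 answer에 기록한다.
--             turn+=1
--             if turn>m: #turn이 게임 참가인원보다 커지면 turn을 다시 1로 한다.
--                 turn=1
--             if len(answer)==t: #미리 구할 숫자의 갯수 t만큼 구했으면 break
--                 break
--         if len(answer)==t:
--             break
--         idx+=1
--     return answer
-- ===== SOURCE B (Python) =====
-- def solution(n, t, m, p):
--     # Build the digit stream once up to the last position the player needs,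
--     # then directly index positions p-1, p-1+m, ..., p-1+(t-1)*m.
--     def rep(i):
--         if i == 0:
--             return "0"
--         s = ""
--         while i > 0:
--             d = i % n
--             s = (format(d, "X") if d >= 10 else str(d)) + s
--             i //= n
--         return s
--
--     need = p - 1 + (t - 1) * m + 1 if t > 0 else 0
--     chunks = []
--     total = 0
--     i = 0
--     while total < need:
--         r = rep(i)
--         chunks.append(r)
--         total += len(r)
--         i += 1
--     stream = "".join(chunks)
--     return "".join(stream[p - 1 + k * m] for k in range(t))
-- ===== Notes on version B (the rewrite author's own statement) =====
-- stated objective: alternative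
-- what changed: B drops A's per-character turn-counter game simulation: it computes the last stream position the player needs, materializes the n-ary digit stream up to it once, and directly indexes positions p-1, p-1+m, ..., p-1+(t-1)*m.
-- outside the precondition, e.g. on solution(2, 3, 0, 1): A returns '011', B returns '000'
import Mathlib
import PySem

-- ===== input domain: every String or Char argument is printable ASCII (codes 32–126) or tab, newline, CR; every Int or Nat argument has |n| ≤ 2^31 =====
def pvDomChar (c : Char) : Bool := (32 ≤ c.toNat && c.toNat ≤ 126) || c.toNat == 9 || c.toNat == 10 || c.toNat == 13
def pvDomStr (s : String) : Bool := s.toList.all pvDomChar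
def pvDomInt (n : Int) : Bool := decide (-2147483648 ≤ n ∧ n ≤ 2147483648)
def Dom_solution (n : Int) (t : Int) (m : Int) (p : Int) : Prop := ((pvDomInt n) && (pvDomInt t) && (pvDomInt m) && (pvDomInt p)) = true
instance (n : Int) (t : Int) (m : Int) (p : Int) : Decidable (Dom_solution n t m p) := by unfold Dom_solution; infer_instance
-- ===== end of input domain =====

-- B replaces A's per-character turn-counter simulation by materializing the digit stream once and
-- directly indexing the t needed positions p-1, p-1+m, …; equal on Pre_ (alternative decomposition, no speed claim).

-- ===== PORT A =====
-- hex(x) for x ≥ 0: "0x" + lowercase hex digits (exact there; A only applies it to idx%n ≥ 10)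
def pvHexDigits (fuel : Nat) (x : Int) (acc : List Char) : List Char :=
  match fuel with
  | 0 => acc
  | fuel+1 =>
    if x > 0 then
      let d := PySem.Int.mod x 16
      pvHexDigits fuel (PySem.Int.floordiv x 16)
        ((if d < 10 then Char.ofNat (48 + d.toNat) else Char.ofNat (87 + d.toNat)) :: acc)
    else acc

def pvHex (x : Int) : List Char :=
  '0' :: 'x' :: (if x = 0 then ['0'] else pvHexDigits (x.toNat + 1) x [])

-- the while-loop of change_num (fuel idx.toNat+1 suffices on Pre_, where 2 ≤ n halves idx each step)
def pvChangeNumL (n : Int) (fuel : Nat) (idx : Int) (result : List Char) : List Char :=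
  match fuel with
  | 0 => result
  | fuel+1 =>
    if idx > 0 then
      let r := PySem.Int.mod idx n
      let piece := if r ≥ 10 then PySem.List.slice (PySem.Chars.upper (pvHex r)) (some 2) none
                   else PySem.Int.toChars r
      pvChangeNumL n fuel (PySem.Int.floordiv idx n) (piece ++ result)
    else result

def pvChangeNum (idx n : Int) : List Char :=
  if idx = 0 then ['0'] else pvChangeNumL n (idx.toNat + 1) idx []

-- the inner 'for i in range(len(num))' loop with its break; returns (answer, turn)
def pvInner (t m p : Int) (cs : List Char) (turn : Int) (answer : List Char) : List Char × Int :=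
  match cs with
  | [] => (answer, turn)
  | c :: rest =>
    let answer := if turn = p then answer ++ [c] else answer
    let turn := turn + 1
    let turn := if turn > m then 1 else turn
    if (answer.length : Int) = t then (answer, turn)
    else pvInner t m p rest turn answer

-- the 'while True' loop; fuel t*m+1 outer iterations suffice on Pre_ (each number contributes ≥ 1 char)
def pvOuter (n t m p : Int) (fuel : Nat) (idx turn : Int) (answer : List Char) : List Char :=
  match fuel with
  | 0 => answer
  | fuel+1 =>
    let num := pvChangeNum idx n
    let res := pvInner t m p num turn answer
    if (res.1.length : Int) = t then res.1
    else pvOuter n t m p fuel (idx + 1) res.2 res.1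

def solution (n : Int) (t : Int) (m : Int) (p : Int) : String :=
  String.ofList (pvOuter n t m p (t.toNat * m.toNat + 1) 0 1 [])

-- ===== PORT B =====
-- format(x, "X") for x ≥ 0 (Source B only formats digits ≥ 10): uppercase hex digits; fuel x.toNat+1 suffices
def pvFormatXL (fuel : Nat) (x : Int) (acc : List Char) : List Char :=
  match fuel with
  | 0 => acc
  | fuel+1 =>
    if x > 0 then
      let d := PySem.Int.mod x 16
      pvFormatXL fuel (PySem.Int.floordiv x 16)
        ((if d < 10 then Char.ofNat (48 + d.toNat) else Char.ofNat (55 + d.toNat)) :: acc)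
    else acc

def pvFormatX (x : Int) : List Char :=
  if x = 0 then ['0'] else pvFormatXL (x.toNat + 1) x []

-- rep's while-loop (fuel i.toNat+1 suffices on Pre_)
def pvRepL (n : Int) (fuel : Nat) (i : Int) (s : List Char) : List Char :=
  match fuel with
  | 0 => s
  | fuel+1 =>
    if i > 0 then
      let d := PySem.Int.mod i n
      pvRepL n fuel (PySem.Int.floordiv i n)
        ((if d ≥ 10 then pvFormatX d else PySem.Int.toChars d) ++ s)
    else s

def pvRep (n i : Int) : List Char := if i = 0 then ['0'] else pvRepL n (i.toNat + 1) i []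

-- the 'while total < need' chunk-building loop (fuel need.toNat+1 suffices on Pre_)
def pvBuild (n need : Int) (fuel : Nat) (i total : Int) (chunks : List (List Char)) : List (List Char) :=
  match fuel with
  | 0 => chunks
  | fuel+1 =>
    if total < need then
      let r := pvRep n i
      pvBuild n need fuel (i + 1) (total + (r.length : Int)) (chunks ++ [r])
    else chunks

def solution_alt (n : Int) (t : Int) (m : Int) (p : Int) : String :=
  let need := if t > 0 then p - 1 + (t - 1) * m + 1 else 0
  let stream := (pvBuild n need (need.toNat + 1) 0 0 []).flatten
  -- "".join(stream[p-1+k*m] for k in range(t)): join of 1-char strings = concatenation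
  String.ofList (((PySem.List.pyRange 0 t 1).map
      (fun k => ((PySem.List.pyGet? stream (p - 1 + k * m)).map (fun c => [c])).getD [])).flatten)

-- ===== PRECONDITION & SPEC =====
-- Pre_ covers the inputs where A terminates: every base but 0 and 1 (n = 0 divides by zero,
-- n = 1 loops forever) with t ≥ 1 and 1 ≤ p ≤ m, plus the two degenerate corners where A
-- stops inside the very first number (t = 0 with p ≠ 1, and t = 1 with p = 1, for any base
-- and any m). It excludes t < 0 and p ∉ [1, m] (A's stop condition never fires and it loops
-- forever) and m < 1 with p = 1 (there A returns only by accidental turn wraparound and B's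
-- direct indexing reads a different position) — see the cite.
def Pre_solution (n : Int) (t : Int) (m : Int) (p : Int) : Prop :=
  ((2 ≤ n ∨ n ≤ -1) ∧ 1 ≤ t ∧ 1 ≤ m ∧ 1 ≤ p ∧ p ≤ m)
    ∨ (t = 0 ∧ p ≠ 1) ∨ (t = 1 ∧ p = 1)
instance (n : Int) (t : Int) (m : Int) (p : Int) : Decidable (Pre_solution n t m p) := by
  unfold Pre_solution; infer_instance

def pvWitness_solution : Int × Int × Int × Int := (2, 4, 3, 2)

def Spec_solution (n : Int) (t : Int) (m : Int) (p : Int) (out : String) : Prop := out = solution_alt n t m p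
instance (n : Int) (t : Int) (m : Int) (p : Int) (out : String) : Decidable (Spec_solution n t m p out) := by
  unfold Spec_solution; infer_instance

-- ===== CLAIM (what is proved, stated in full; the proofs are below) =====
def Claim_equal_solution : Prop := ∀ (n : Int) (t : Int) (m : Int) (p : Int), Dom_solution n t m p → Pre_solution n t m p → Spec_solution n t m p (solution n t m p)

-- ===== LEMMAS AND PROOFS =====

-- the stream of concatenated n-ary representations of a, a+1, …, a+k-1 (in B's rep form)
def pvNums (n a : Int) (k : Nat) : List Char :=
  (List.range k).flatMap (fun j : Nat => pvRep n (a + (j : Int)))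

-- the subsequence of cs picked at offsets r, r+M, r+2M, …
def pvPick (M : Nat) : List Char → Nat → List Char
  | [], _ => []
  | c :: cs, 0 => c :: pvPick M cs (M - 1)
  | _ :: cs, r+1 => pvPick M cs r

-- distance (mod m) from turn to the next picking turn p
def pvROf (p m turn : Int) : Nat := ((p - turn) % m).toNat

theorem pvUpper_digit (d : Int) (h0 : 0 ≤ d) (h1 : d < 16) :
    PySem.Chars.upperChar (if d < 10 then Char.ofNat (48 + d.toNat) else Char.ofNat (87 + d.toNat))
      = (if d < 10 then Char.ofNat (48 + d.toNat) else Char.ofNat (55 + d.toNat)) := by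
  interval_cases d <;> decide

theorem pvHexDigits_upper (fuel : Nat) : ∀ (x : Int) (acc : List Char),
    (pvHexDigits fuel x acc).map PySem.Chars.upperChar
      = pvFormatXL fuel x (acc.map PySem.Chars.upperChar) := by
  induction fuel with
  | zero => intro x acc; simp [pvHexDigits, pvFormatXL]
  | succ fuel ih =>
    intro x acc
    by_cases hx : x > 0
    · have h0 : (0:Int) ≤ PySem.Int.mod x 16 := PySem.Int.mod_nonneg x (by norm_num)
      have h1 : PySem.Int.mod x 16 < 16 := PySem.Int.mod_lt x (by norm_num)
      simp only [pvHexDigits, pvFormatXL, if_pos hx]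
      rw [ih]
      simp only [List.map_cons]
      rw [pvUpper_digit _ h0 h1]
    · simp [pvHexDigits, pvFormatXL, hx]

theorem pvPiece_eq (r : Int) :
    (if r ≥ 10 then PySem.List.slice (PySem.Chars.upper (pvHex r)) (some 2) none
     else PySem.Int.toChars r)
      = (if r ≥ 10 then pvFormatX r else PySem.Int.toChars r) := by
  by_cases hr : r ≥ 10
  · simp only [if_pos hr]
    have hne : ¬ (r = 0) := by omega
    simp only [pvHex, if_neg hne]
    have hup : PySem.Chars.upper ('0' :: 'x' :: pvHexDigits (r.toNat + 1) r [])
        = ('0' :: 'x' :: pvHexDigits (r.toNat + 1) r []).map PySem.Chars.upperChar := rfl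
    rw [hup]
    rw [PySem.List.slice_from _ (by norm_num : (0:Int) ≤ 2)]
    have h2 : ((2:Int)).toNat = 2 := rfl
    simp only [List.map_cons, h2, List.drop_succ_cons, List.drop_zero]
    rw [pvHexDigits_upper]
    simp only [List.map_nil]
    unfold pvFormatX
    rw [if_neg hne]
  · simp [hr]

theorem pvChangeNumL_eq (n : Int) (fuel : Nat) :
    ∀ (idx : Int) (acc : List Char),
    pvChangeNumL n fuel idx acc = pvRepL n fuel idx acc := by
  induction fuel with
  | zero => intro idx acc; rfl
  | succ fuel ih =>
    intro idx acc
    by_cases hi : idx > 0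
    · simp only [pvChangeNumL, pvRepL, if_pos hi]
      rw [ih, pvPiece_eq]
    · simp [pvChangeNumL, pvRepL, hi]

theorem pvChangeNum_eq (n idx : Int) : pvChangeNum idx n = pvRep n idx := by
  unfold pvChangeNum pvRep
  by_cases h : idx = 0
  · simp [h]
  · simp only [if_neg h]
    exact pvChangeNumL_eq n _ idx []

theorem pvFormatXL_len (fuel : Nat) : ∀ (x : Int) (acc : List Char),
    acc.length ≤ (pvFormatXL fuel x acc).length := by
  induction fuel with
  | zero => intro x acc; simp [pvFormatXL]
  | succ fuel ih =>
    intro x acc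
    by_cases hx : x > 0
    · simp only [pvFormatXL, if_pos hx]
      calc acc.length ≤ acc.length + 1 := by omega
        _ = (_ :: acc).length := rfl
        _ ≤ _ := ih _ _
    · simp [pvFormatXL, hx]

theorem pvRepL_len (n : Int) (fuel : Nat) : ∀ (i : Int) (s : List Char),
    s.length ≤ (pvRepL n fuel i s).length := by
  induction fuel with
  | zero => intro i s; simp [pvRepL]
  | succ fuel ih =>
    intro i s
    by_cases hi : i > 0
    · simp only [pvRepL, if_pos hi]
      calc s.length ≤ ((if PySem.Int.mod i n ≥ 10 then pvFormatX (PySem.Int.mod i n)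
              else PySem.Int.toChars (PySem.Int.mod i n)) ++ s).length := by
            simp [List.length_append]
        _ ≤ _ := ih _ _
    · simp [pvRepL, hi]

theorem pvToChars_ne (r : Int) : 1 ≤ (PySem.Int.toChars r).length := by
  have h : ∀ (f n : Nat) (acc : List Char), acc.length ≤ (Nat.toDigitsCore 10 f n acc).length := by
    intro f
    induction f with
    | zero => intro n acc; simp [Nat.toDigitsCore]
    | succ f ih =>
      intro n acc
      simp only [Nat.toDigitsCore]
      split
      · simp
      · calc acc.length ≤ (Nat.digitChar (n % 10) :: acc).length := by simp
          _ ≤ _ := ih _ _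
  have h2 : ∀ (f n : Nat) (acc : List Char), 1 ≤ f → 1 + acc.length ≤ (Nat.toDigitsCore 10 f n acc).length := by
    intro f n acc hf
    match f, hf with
    | f+1, _ =>
      simp only [Nat.toDigitsCore]
      split
      · simp
        omega
      · calc 1 + acc.length = (Nat.digitChar (n % 10) :: acc).length := by simp [Nat.add_comm]
          _ ≤ _ := h _ _ _
  simp only [PySem.Int.toChars, Nat.toDigits]
  split
  · have := h2 (r.natAbs + 1) r.natAbs [] (by omega)
    simp only [List.length_cons]
    omega
  · have := h2 (r.toNat + 1) r.toNat [] (by omega)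
    simpa using this

theorem pvFormatX_ne (x : Int) (hx0 : 0 ≤ x) : 1 ≤ (pvFormatX x).length := by
  unfold pvFormatX
  by_cases h : x = 0
  · simp [h]
  · simp only [if_neg h]
    have hx : x > 0 := by omega
    simp only [pvFormatXL, if_pos hx]
    calc 1 ≤ ([(if PySem.Int.mod x 16 < 10 then Char.ofNat (48 + (PySem.Int.mod x 16).toNat)
                else Char.ofNat (55 + (PySem.Int.mod x 16).toNat))] : List Char).length := by simp
      _ ≤ _ := pvFormatXL_len _ _ _

theorem pvRep_ne_len (n i : Int) (hi : 0 ≤ i) : 1 ≤ (pvRep n i).length := by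
  unfold pvRep
  by_cases h : i = 0
  · simp [h]
  · simp only [if_neg h]
    have hig : i > 0 := by omega
    simp only [pvRepL, if_pos hig]
    calc 1 ≤ ((if PySem.Int.mod i n ≥ 10 then pvFormatX (PySem.Int.mod i n)
                else PySem.Int.toChars (PySem.Int.mod i n)) ++ ([]:List Char)).length := by
          simp only [List.append_nil]
          split
          · exact pvFormatX_ne _ (by omega)
          · exact pvToChars_ne _
      _ ≤ _ := pvRepL_len n _ _ _

theorem pvNums_succ (n a : Int) (k : Nat) :
    pvNums n a (k + 1) = pvNums n a k ++ pvRep n (a + (k : Int)) := by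
  unfold pvNums
  simp only [List.range_succ, List.flatMap_append, List.flatMap_singleton]

theorem pvNums_len (n a : Int) (ha : 0 ≤ a) (k : Nat) : k ≤ (pvNums n a k).length := by
  induction k with
  | zero => simp [pvNums]
  | succ k ih =>
    rw [pvNums_succ]
    have := pvRep_ne_len n (a + (k:Int)) (by omega)
    simp only [List.length_append]
    omega

theorem pvNums_split (n a : Int) (u v : Nat) :
    pvNums n a (u + v) = pvNums n a u ++ pvNums n (a + (u : Int)) v := by
  unfold pvNums
  simp only [List.range_add, List.flatMap_append, List.flatMap_map]
  congr 1
  push_cast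
  ring_nf

theorem pvPick_append (M : Nat) (hM : 0 < M) (xs ys : List Char) : ∀ (r : Nat), r < M →
    pvPick M (xs ++ ys) r = pvPick M xs r ++ pvPick M ys ((((r : Int) - xs.length) % M).toNat) := by
  induction xs with
  | nil =>
    intro r hr
    have h1 : (((r:Int)) % (M:Int)).toNat = r := by
      rw [Int.emod_eq_of_lt (by positivity) (by exact_mod_cast hr)]
      omega
    simp [pvPick, h1]
  | cons x xs ih =>
    intro r hr
    match r with
    | 0 =>
      simp only [List.cons_append, pvPick, Nat.cast_zero]
      rw [ih (M-1) (by omega)]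
      have heq : (((M-1 : Nat) : Int) - xs.length) % M = ((0:Int) - ((x::xs).length)) % M := by
        have h2 : ((M-1:Nat):Int) - (xs.length:Int) = ((0:Int) - (((x::xs).length:Int))) + (M:Int) * 1 := by
          simp only [List.length_cons]; push_cast; omega
        rw [h2, Int.add_mul_emod_self_left]
      rw [heq]
    | r+1 =>
      simp only [List.cons_append, pvPick]
      rw [ih r (by omega)]
      have h2 : ((r:Nat):Int) - (xs.length:Int) = (((r+1:Nat)):Int) - (((x::xs).length):Int) := by
        simp only [List.length_cons]; push_cast; ring
      rw [h2]

theorem pvPick_len (M : Nat) (hM : 0 < M) (cs : List Char) : ∀ (r : Nat), r < M →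
    (cs.length : Int) + (((r : Int) - cs.length) % M) = r + (pvPick M cs r).length * M := by
  induction cs with
  | nil =>
    intro r hr
    have h1 : ((r:Int)) % (M:Int) = (r:Int) := by
      exact Int.emod_eq_of_lt (by positivity) (by exact_mod_cast hr)
    simp [pvPick, h1]
  | cons x xs ih =>
    intro r hr
    match r with
    | 0 =>
      have ihh := ih (M-1) (by omega)
      have hsh : (((M-1:Nat):Int) - xs.length) % M = ((0:Int) - ((x::xs).length)) % M := by
        have h2 : ((M-1:Nat):Int) - (xs.length:Int) = ((0:Int) - (((x::xs).length:Int))) + (M:Int) * 1 := by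
          simp only [List.length_cons]; push_cast; omega
        rw [h2, Int.add_mul_emod_self_left]
      rw [hsh] at ihh
      simp only [pvPick, List.length_cons]
      have hM1 : ((M-1:Nat):Int) = (M:Int) - 1 := by omega
      rw [hM1] at ihh
      simp only [List.length_cons] at ihh
      push_cast at ihh ⊢
      linarith [ihh]
    | r+1 =>
      have ihh := ih r (by omega)
      have h2 : ((r:Nat):Int) - (xs.length:Int) = (((r+1:Nat)):Int) - (((x::xs).length):Int) := by
        simp only [List.length_cons]; push_cast; ring
      rw [h2] at ihh
      simp only [pvPick, List.length_cons]
      simp only [List.length_cons] at ihh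
      push_cast at ihh ⊢
      linarith [ihh]

theorem pvPick_cons_elim (M : Nat) (cs : List Char) (r : Nat) (h : r < cs.length) :
    pvPick M cs r = cs.getD r ' ' :: pvPick M (cs.drop (r + 1)) (M - 1) := by
  induction r generalizing cs with
  | zero =>
    match cs, h with
    | c :: cs, _ => simp [pvPick]
  | succ r ih =>
    match cs, h with
    | c :: cs, h =>
      have hlt : r < cs.length := by simpa using h
      simp only [pvPick, List.getD_cons_succ, List.drop_succ_cons]
      exact ih cs hlt

theorem pvPick_stride (M : Nat) (hM : 0 < M) : ∀ (q : Nat) (r : Nat) (cs : List Char),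
    (∀ k < q, r + k * M < cs.length) →
    (pvPick M cs r).take q = (List.range q).map (fun k => cs.getD (r + k * M) ' ') := by
  intro q
  induction q with
  | zero => intro r cs _; simp
  | succ q ih =>
    intro r cs hpos
    have hr : r < cs.length := by
      have := hpos 0 (by omega)
      simpa using this
    rw [pvPick_cons_elim M cs r hr]
    have hlen : (cs.drop (r+1)).length = cs.length - (r+1) := List.length_drop
    have htail := ih (M-1) (cs.drop (r+1)) (by
      intro k hk
      have h1 := hpos (k+1) (by omega)
      have h2 : r + (k+1) * M = r + k * M + M := by ring
      omega)
    rw [List.take_succ_cons, htail, List.range_succ_eq_map, List.map_cons, List.map_map]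
    congr 1
    · simp
    · apply List.map_congr_left
      intro k hk
      simp only [Function.comp_apply]
      rw [List.getD_eq_getElem?_getD, List.getD_eq_getElem?_getD, List.getElem?_drop]
      congr 2
      have hsk : Nat.succ k * M = k * M + M := by rw [Nat.succ_eq_add_one]; ring
      omega

theorem pvROf_val (p m turn : Int) (_hm : 1 ≤ m) (hp1 : 1 ≤ p) (hp2 : p ≤ m)
    (ht1 : 1 ≤ turn) (ht2 : turn ≤ m) :
    ((p - turn) % m) = if turn ≤ p then p - turn else p - turn + m := by
  by_cases h : turn <= p
  · rw [Int.emod_eq_of_lt (by omega) (by omega), if_pos h]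
  · rw [if_neg h]
    conv_lhs => rw [show p - turn = (p - turn + m) + m * (-1) by ring]
    rw [Int.add_mul_emod_self_left]
    exact Int.emod_eq_of_lt (by omega) (by omega)

theorem pvROf_lt (p m turn : Int) (hm : 0 < m) : pvROf p m turn < m.toNat := by
  unfold pvROf
  have h1 := Int.emod_nonneg (p - turn) (by omega : m ≠ 0)
  have h2 := Int.emod_lt_of_pos (p - turn) hm
  omega

theorem pvROf_cast (p m turn : Int) (hm : 0 < m) : ((pvROf p m turn : Nat) : Int) = (p - turn) % m := by
  unfold pvROf
  have h1 := Int.emod_nonneg (p - turn) (by omega : m ≠ 0)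
  omega

theorem pvROf_zero_iff (p m turn : Int) (hm : 1 ≤ m) (hp1 : 1 ≤ p) (hp2 : p ≤ m)
    (ht1 : 1 ≤ turn) (ht2 : turn ≤ m) : pvROf p m turn = 0 ↔ turn = p := by
  unfold pvROf
  rw [pvROf_val p m turn hm hp1 hp2 ht1 ht2]
  split_ifs with h <;> omega

theorem pvNext_bounds (m turn : Int) (hm : 1 ≤ m) (ht1 : 1 ≤ turn) :
    1 ≤ (if turn + 1 > m then 1 else turn + 1) ∧ (if turn + 1 > m then 1 else turn + 1) ≤ m := by
  split_ifs with h <;> omega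

theorem pvROf_next (p m turn : Int) (hm : 1 ≤ m) (hp1 : 1 ≤ p) (hp2 : p ≤ m)
    (ht1 : 1 ≤ turn) (ht2 : turn ≤ m) :
    pvROf p m (if turn + 1 > m then 1 else turn + 1)
      = if turn = p then m.toNat - 1 else pvROf p m turn - 1 := by
  have hb := pvNext_bounds m turn hm ht1
  unfold pvROf
  rw [pvROf_val p m _ hm hp1 hp2 hb.1 hb.2, pvROf_val p m turn hm hp1 hp2 ht1 ht2]
  split_ifs <;> omega

theorem pvInner_spec (t m p : Int) (T : Nat) (hT : t = (T : Int)) (hm : 1 ≤ m)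
    (hp1 : 1 ≤ p) (hp2 : p ≤ m) :
    ∀ (cs : List Char) (turn : Int) (ans : List Char), 1 ≤ turn → turn ≤ m → ans.length < T →
      (pvInner t m p cs turn ans).1
          = ans ++ (pvPick m.toNat cs (pvROf p m turn)).take (T - ans.length)
        ∧ ((pvPick m.toNat cs (pvROf p m turn)).length < T - ans.length →
            1 ≤ (pvInner t m p cs turn ans).2 ∧ (pvInner t m p cs turn ans).2 ≤ m ∧
            pvROf p m (pvInner t m p cs turn ans).2
              = (((pvROf p m turn : Int) - cs.length) % m).toNat) := by
  intro cs
  induction cs with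
  | nil =>
    intro turn ans h1 h2 h3
    refine ⟨by simp [pvInner, pvPick], ?_⟩
    intro _
    refine ⟨h1, h2, ?_⟩
    simp only [pvInner, List.length_nil, Nat.cast_zero, sub_zero]
    rw [pvROf_cast p m turn (by omega)]
    unfold pvROf
    rw [Int.emod_emod_of_dvd _ dvd_rfl]
  | cons c rest ih =>
    intro turn ans h1 h2 h3
    by_cases hturn : turn = p
    · have hr0 : pvROf p m turn = 0 := (pvROf_zero_iff p m turn hm hp1 hp2 h1 h2).2 hturn
      have hnext : pvROf p m (if turn + 1 > m then 1 else turn + 1) = m.toNat - 1 := by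
        rw [pvROf_next p m turn hm hp1 hp2 h1 h2, if_pos hturn]
      have hnb := pvNext_bounds m turn hm h1
      rw [hr0]
      simp only [pvInner, if_pos hturn]
      by_cases hbrk : (((ans ++ [c]).length : Nat) : Int) = t
      · have hlen : ans.length + 1 = T := by
          rw [hT] at hbrk
          simp only [List.length_append, List.length_cons, List.length_nil] at hbrk
          omega
        have h4 : T - ans.length = 1 := by omega
        simp only [if_pos hbrk]
        constructor
        · simp [pvPick, h4]
        · intro hcon
          simp only [pvPick, List.length_cons] at hcon
          omega
      · have hlen : ans.length + 1 < T := by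
          rw [hT] at hbrk
          simp only [List.length_append, List.length_cons, List.length_nil] at hbrk
          omega
        simp only [if_neg hbrk]
        have ihh := ih (if turn + 1 > m then 1 else turn + 1) (ans ++ [c]) hnb.1 hnb.2
          (by simpa using hlen)
        rw [hnext] at ihh
        constructor
        · rw [ihh.1]
          have h5 : T - ans.length = (T - (ans ++ [c]).length) + 1 := by
            simp only [List.length_append, List.length_cons, List.length_nil]
            omega
          rw [h5]
          simp [pvPick, List.take_succ_cons, List.append_assoc]
        · intro hcon
          simp only [pvPick, List.length_cons] at hcon
          have hcon2 : (pvPick m.toNat rest (m.toNat - 1)).length < T - (ans ++ [c]).length := by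
            simp only [List.length_append, List.length_cons, List.length_nil]
            omega
          obtain ⟨b1, b2, b3⟩ := ihh.2 hcon2
          refine ⟨b1, b2, ?_⟩
          rw [b3]
          congr 1
          have h6 : ((m.toNat - 1 : Nat) : Int) - ((rest.length : Nat) : Int)
              = (((0:Nat) : Int) - (((c :: rest).length : Nat) : Int)) + m * 1 := by
            simp only [List.length_cons]
            push_cast
            omega
          rw [h6, Int.add_mul_emod_self_left]
    · have hrpos : 1 ≤ pvROf p m turn := by
        have hz := pvROf_zero_iff p m turn hm hp1 hp2 h1 h2
        omega
      obtain ⟨r2, hr2⟩ : ∃ r2, pvROf p m turn = r2 + 1 := ⟨pvROf p m turn - 1, by omega⟩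
      have hnext : pvROf p m (if turn + 1 > m then 1 else turn + 1) = r2 := by
        rw [pvROf_next p m turn hm hp1 hp2 h1 h2, if_neg hturn]
        omega
      have hnb := pvNext_bounds m turn hm h1
      have hne : ¬ (((ans.length : Nat) : Int) = t) := by
        rw [hT]
        omega
      rw [hr2]
      simp only [pvInner, if_neg hturn, if_neg hne]
      have ihh := ih (if turn + 1 > m then 1 else turn + 1) ans hnb.1 hnb.2 h3
      rw [hnext] at ihh
      constructor
      · rw [ihh.1]
        simp [pvPick]
      · intro hcon
        simp only [pvPick] at hcon
        obtain ⟨b1, b2, b3⟩ := ihh.2 hcon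
        refine ⟨b1, b2, ?_⟩
        rw [b3]
        congr 1
        have h6 : ((r2 : Nat) : Int) - ((rest.length : Nat) : Int)
            = (((r2 + 1 : Nat) : Int) - (((c :: rest).length : Nat) : Int)) := by
          simp only [List.length_cons]
          push_cast
          ring
        rw [h6]

theorem pvOuter_spec (n t m p : Int) (T : Nat) (hT : t = (T : Int)) (hm : 1 ≤ m)
    (hp1 : 1 ≤ p) (hp2 : p ≤ m) :
    ∀ (fuel : Nat) (idx turn : Int) (ans : List Char), 0 ≤ idx → 1 ≤ turn → turn ≤ m →
      ans.length < T →
      pvROf p m turn + (T - ans.length - 1) * m.toNat + 1 ≤ (pvNums n idx fuel).length →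
      pvOuter n t m p fuel idx turn ans
        = ans ++ (pvPick m.toNat (pvNums n idx fuel) (pvROf p m turn)).take (T - ans.length) := by
  intro fuel
  induction fuel with
  | zero =>
    intro idx turn ans hidx h1 h2 h3 hfuel
    exfalso
    simp only [pvNums, List.range_zero, List.flatMap_nil, List.length_nil] at hfuel
    omega
  | succ fuel ihf =>
    intro idx turn ans hidx h1 h2 h3 hfuel
    have hMpos : 0 < m.toNat := by omega
    have hcast : ((m.toNat : Nat) : Int) = m := by omega
    have hrlt : pvROf p m turn < m.toNat := pvROf_lt p m turn (by omega)
    have hone : pvNums n idx 1 = pvRep n idx := by simp [pvNums]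
    have hsplit : pvNums n idx (fuel + 1) = pvRep n idx ++ pvNums n (idx + 1) fuel := by
      rw [show fuel + 1 = 1 + fuel by omega, pvNums_split n idx 1 fuel, hone]
      norm_num
    have hinner := pvInner_spec t m p T hT hm hp1 hp2 (pvRep n idx) turn ans h1 h2 h3
    have hpickapp := pvPick_append m.toNat hMpos (pvRep n idx) (pvNums n (idx + 1) fuel)
      (pvROf p m turn) hrlt
    rw [hcast] at hpickapp
    simp only [pvOuter]
    rw [pvChangeNum_eq n idx]
    set res := pvInner t m p (pvRep n idx) turn ans with hresdef
    set R := pvPick m.toNat (pvRep n idx) (pvROf p m turn) with hRdef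
    by_cases hbrk : ((res.1.length : Nat) : Int) = t
    · simp only [if_pos hbrk]
      have hlen : res.1.length = T := by omega
      have hkq : T - ans.length ≤ R.length := by
        rw [hinner.1] at hlen
        simp only [List.length_append, List.length_take] at hlen
        omega
      rw [hsplit, hpickapp, List.take_append_of_le_length hkq]
      exact hinner.1
    · simp only [if_neg hbrk]
      have h7 : res.1.length = ans.length + min (T - ans.length) R.length := by
        rw [hinner.1]
        simp [List.length_take]
      have h8 : ¬ (res.1.length = T) := by omega
      have hklt : R.length < T - ans.length := by omega
      obtain ⟨b1, b2, b3⟩ := hinner.2 hklt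
      have hfull : List.take (T - ans.length) R = R := List.take_of_length_le (by omega)
      have hres1 : res.1 = ans ++ R := by rw [hinner.1, hfull]
      have hreslen : res.1.length = ans.length + R.length := by rw [hres1]; simp
      -- length accounting from pvPick_len
      have hlenEq := pvPick_len m.toNat hMpos (pvRep n idx) (pvROf p m turn) hrlt
      rw [hcast, ← hRdef] at hlenEq
      have hK : ((R.length * m.toNat : Nat) : Int) = (R.length : Int) * ((m.toNat : Nat) : Int) := by
        push_cast
        ring
      rw [hcast] at hK
      rw [← hK] at hlenEq
      have hmodpos := Int.emod_nonneg ((pvROf p m turn : Int) - ((pvRep n idx).length : Int))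
        (by omega : m ≠ 0)
      have hmodlt := Int.emod_lt_of_pos ((pvROf p m turn : Int) - ((pvRep n idx).length : Int))
        (by omega : (0:Int) < m)
      have hsplitlen : (pvNums n idx (fuel + 1)).length
          = (pvRep n idx).length + (pvNums n (idx + 1) fuel).length := by
        rw [hsplit]; simp
      rw [hsplitlen] at hfuel
      have e2 : (T - ans.length - 1) * m.toNat
          = (T - (ans.length + R.length) - 1) * m.toNat + R.length * m.toNat := by
        rw [show T - ans.length - 1 = (T - (ans.length + R.length) - 1) + R.length by omega]
        ring
      have hfuel2 : pvROf p m res.2 + (T - res.1.length - 1) * m.toNat + 1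
          ≤ (pvNums n (idx + 1) fuel).length := by
        rw [b3, hreslen]
        omega
      have ihh := ihf (idx + 1) res.2 res.1 (by omega) b1 b2 (by omega) hfuel2
      rw [ihh, b3, hres1, hsplit, hpickapp, List.take_append, hfull]
      have e3 : T - (ans ++ R).length = T - ans.length - R.length := by
        simp only [List.length_append]
        omega
      rw [e3, List.append_assoc]
theorem pvBuild_spec (n need : Int) :
    ∀ (fuel : Nat) (i' : Nat) (total : Int) (chunks : List (List Char)),
      total = ((pvNums n 0 i').length : Int) → chunks.flatten = pvNums n 0 i' →
      need ≤ total + (fuel : Int) →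
      ∃ K : Nat, (pvBuild n need fuel (i' : Int) total chunks).flatten = pvNums n 0 K ∧
        need ≤ ((pvNums n 0 K).length : Int) := by
  intro fuel
  induction fuel with
  | zero =>
    intro i' total chunks htot hfl hge
    refine ⟨i', by simpa [pvBuild] using hfl, ?_⟩
    simp only [Nat.cast_zero, add_zero] at hge
    omega
  | succ fuel ihf =>
    intro i' total chunks htot hfl hge
    by_cases hlt : total < need
    · simp only [pvBuild, if_pos hlt]
      have hstep : (chunks ++ [pvRep n (i' : Int)]).flatten = pvNums n 0 (i' + 1) := by
        rw [List.flatten_append, hfl, pvNums_succ]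
        simp
      have harg : ((i' : Int) + 1) = ((i' + 1 : Nat) : Int) := by push_cast; ring
      have hlen1 : 1 ≤ (pvRep n (i' : Int)).length := pvRep_ne_len n _ (by positivity)
      have htot2 : total + (((pvRep n (i' : Int)).length : Nat) : Int)
          = ((pvNums n 0 (i' + 1)).length : Int) := by
        rw [pvNums_succ]
        simp only [List.length_append, zero_add]
        push_cast
        omega
      rw [harg]
      exact ihf (i' + 1) _ _ htot2 hstep (by push_cast at hge ⊢; omega)
    · simp only [pvBuild, if_neg hlt]
      exact ⟨i', hfl, by omega⟩

theorem pvNums_getD_mono (n : Int) (a b pos : Nat) (hab : a ≤ b)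
    (hpos : pos < (pvNums n 0 a).length) :
    (pvNums n 0 a).getD pos ' ' = (pvNums n 0 b).getD pos ' ' := by
  conv_rhs => rw [show b = a + (b - a) by omega, pvNums_split n 0 a (b - a)]
  rw [List.getD_eq_getElem?_getD, List.getD_eq_getElem?_getD, List.getElem?_append_left hpos]

-- flatten of singleton chunks is a map ("".join of one-char strings)
theorem pvFlattenSingles (g : Nat → Char) (l : List Nat) :
    ((l.map fun k => [g k]).flatten) = l.map g := by
  induction l with
  | nil => simp
  | cons x xs ih => simp [ih]

-- the two degenerate corners: A stops inside the very first number "0"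
theorem pvCorner_t0 (n t m p : Int) (ht : t = 0) (hp : p ≠ 1) :
    solution n t m p = solution_alt n t m p := by
  subst ht
  have h1 : ¬ ((1:Int) = p) := fun hc => hp hc.symm
  have hz : pvChangeNum 0 n = ['0'] := by simp [pvChangeNum]
  unfold solution solution_alt
  simp [pvOuter, pvInner, pvBuild, hz, h1, PySem.List.pyRange]

theorem pvCorner_t1 (n t m p : Int) (ht : t = 1) (hp : p = 1) :
    solution n t m p = solution_alt n t m p := by
  subst ht hp
  have hz : pvChangeNum 0 n = ['0'] := by simp [pvChangeNum]
  have hrep : pvRep n 0 = ['0'] := by simp [pvRep]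
  unfold solution solution_alt
  simp [pvOuter, pvInner, pvBuild, hz, hrep, PySem.List.pyRange, PySem.List.pyGet?]
  decide

-- ===== VERDICT (by name: the statement is the Claim_ definition above) =====
theorem solution_spec : Claim_equal_solution := by
  unfold Claim_equal_solution
  intro n t m p hDom hPre
  unfold Spec_solution
  rcases hPre with ⟨hn, ht, hm, hp1, hp2⟩ | ⟨ht, hp⟩ | ⟨ht, hp⟩
  case inr.inl => exact pvCorner_t0 n t m p ht hp
  case inr.inr => exact pvCorner_t1 n t m p ht hp
  set T := t.toNat with hTdef
  set M := m.toNat with hMdef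
  set P := (p - 1).toNat with hPdef
  have hT : t = (T : Int) := by omega
  have hM : m = (M : Int) := by omega
  have hP : p - 1 = (P : Int) := by omega
  have hT1 : 1 ≤ T := by omega
  have hM1 : 1 ≤ M := by omega
  have hPM : P < M := by omega
  set need := P + (T - 1) * M + 1 with hneeddef
  have hexp : (T - 1) * M + M = T * M := by
    rw [show T * M = ((T - 1) + 1) * M by rw [Nat.sub_add_cancel hT1]]
    ring
  have hneedle : need ≤ T * M + 1 := by omega
  have hneed : p - 1 + (t - 1) * m + 1 = ((need : Nat) : Int) := by
    rw [hneeddef]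
    push_cast
    rw [← hP, ← hM, show (((T - 1 : Nat)) : Int) = t - 1 by omega]
  have hSAlen : T * M + 1 ≤ (pvNums n 0 (T * M + 1)).length :=
    pvNums_len n 0 (by omega) (T * M + 1)
  have hkM : ∀ k, k < T → k * M ≤ (T - 1) * M := fun k hk =>
    Nat.mul_le_mul_right M (by omega)
  -- A side
  have hr1 : pvROf p m 1 = P := by
    unfold pvROf
    rw [Int.emod_eq_of_lt (by omega) (by omega)]
  have houter := pvOuter_spec n t m p T hT hm hp1 hp2 (T * M + 1) 0 1 []
    (by omega) (by omega) (by omega) (by simp only [List.length_nil]; omega) (by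
      rw [hr1]
      simp only [List.length_nil, Nat.sub_zero]
      rw [← hMdef]
      omega)
  rw [hr1] at houter
  simp only [List.nil_append, List.length_nil, Nat.sub_zero] at houter
  have hstrA := pvPick_stride M (by omega) T P (pvNums n 0 (T * M + 1)) (by
    intro k hk
    have := hkM k hk
    omega)
  -- B side
  have hbuild := pvBuild_spec n ((need : Nat) : Int) (need + 1) 0 0 []
    (by simp [pvNums]) (by simp [pvNums]) (by push_cast; omega)
  simp only [Nat.cast_zero] at hbuild
  obtain ⟨K, hKflat, hKlen⟩ := hbuild
  have hKlen2 : need ≤ (pvNums n 0 K).length := by omega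
  -- assemble
  show solution n t m p = solution_alt n t m p
  unfold solution solution_alt
  rw [← hTdef, ← hMdef, houter, hstrA, if_pos (show t > 0 by omega), hneed]
  simp only [Int.toNat_natCast]
  rw [hKflat]
  rw [hT, PySem.List.pyRange_zero_natCast, List.map_map]
  have hmapB : (List.range T).map
      ((fun k => ((PySem.List.pyGet? (pvNums n 0 K) (p - 1 + k * m)).map fun c => [c]).getD [])
        ∘ fun k : Nat => (k : Int))
      = (List.range T).map (fun k => [(pvNums n 0 K).getD (P + k * M) ' ']) := by
    apply List.map_congr_left
    intro k hk
    have hkT : k < T := List.mem_range.mp hk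
    have hposcast : p - 1 + (k : Int) * m = ((P + k * M : Nat) : Int) := by
      rw [hP, hM]
      push_cast
      ring
    have hbound : P + k * M < (pvNums n 0 K).length := by
      have := hkM k hkT
      omega
    simp only [Function.comp_apply, hposcast, PySem.List.pyGet?_natCast]
    rw [List.getElem?_eq_getElem hbound]
    simp [List.getD_eq_getElem?_getD, List.getElem?_eq_getElem hbound]
  rw [hmapB, pvFlattenSingles (fun k => (pvNums n 0 K).getD (P + k * M) ' ') (List.range T)]
  apply congrArg String.ofList
  apply List.map_congr_left
  intro k hk
  have hkT : k < T := List.mem_range.mp hk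
  have hbA : P + k * M < (pvNums n 0 (T * M + 1)).length := by
    have := hkM k hkT
    omega
  have hbB : P + k * M < (pvNums n 0 K).length := by
    have := hkM k hkT
    omega
  rw [pvNums_getD_mono n (T * M + 1) (max (T * M + 1) K) (P + k * M) (le_max_left _ _) hbA,
    pvNums_getD_mono n K (max (T * M + 1) K) (P + k * M) (le_max_right _ _) hbB]
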